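-- pv_equiv track=rewrite | github.com/iarcs/net | src/pec.py | pec_calc
-- ===== SOURCE A (Python) =====
-- import itertools
--
-- def ranges_to_points(dim_ranges):
--     tl = []
--     pl = set()
--     for r in dim_ranges:
--         pl.add(r[0])
--         pl.add(r[1] + 1)
--     pl = list(pl)
--     pl.sort()
--     pl = pl[:-1]
--     #pl=set(pl)
--     return pl
--
-- def identify_pec(ranges, point):
--     ret = []
--     for j, r in enumerate(ranges):
--         f = 0
--         for i, pd in enumerate(point):
--             if r[i][0] > pd or r[i][1] < pd:
--                 f = 1
--         if f == 0:
--             ret.append(j)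
--
--         ret.sort()
--     return tuple(ret)
--
-- def pec_calc(ranges):
--     points = []
--     pecs = set()
--     for dim in range(len(ranges[0])):
--         dim_range = [r[dim] for r in ranges]
--         points.append(ranges_to_points(dim_range))
--
--     points = itertools.product(*points)
--
--     for p in points:
--         pec = identify_pec(ranges, p)
--         if pec != ():
--             pecs.add(pec)
--     return pecs
--
-- ret = pec_calc([[(10, 20), (10, 20), (10, 20)], [(10, 20), (10, 20), (10, 20)],
--                 [(10, 20), (10, 20), (10, 20)]])
-- ===== SOURCE B (Python) =====
-- import itertools
--
-- def pec_calc(ranges):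
--     # Precompute, per dimension, breakpoints and a dict coordinate -> set of
--     # covering rule indices; per grid point just intersect the D precomputed
--     # sets (no per-rule interval tests and no repeated in-loop sort).
--     ndim = len(ranges[0])
--     points = []
--     cover = []
--     for dim in range(ndim):
--         bps = set()
--         for r in ranges:
--             bps.add(r[dim][0])
--             bps.add(r[dim][1] + 1)
--         bps = sorted(bps)[:-1]
--         points.append(bps)
--         cover.append({c: {j for j, r in enumerate(ranges)
--                           if r[dim][0] <= c <= r[dim][1]} for c in bps})
--     pecs = set()
--     for p in itertools.product(*points):
--         s = list(range(len(ranges)))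
--         for d, c in enumerate(p):
--             cov = cover[d][c]
--             s = [j for j in s if j in cov]
--             if not s:
--                 break
--         if s:
--             pecs.add(tuple(s))
--     return pecs
-- ===== Notes on version B (the rewrite author's own statement) =====
-- stated objective: alternative
-- what changed: Instead of testing every rule against every grid point dimension-by-dimension (with a redundant re-sort of the result list inside the per-rule loop), B precomputes per dimension a dictionary from each breakpoint coordinate to the set of rules covering it, and per grid point just intersects the D precomputed sets; intended as faster (measured 4.9x at the largest size both finished, unconfirmed beyond, both being exponential in the grid size).
import Mathlib
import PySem

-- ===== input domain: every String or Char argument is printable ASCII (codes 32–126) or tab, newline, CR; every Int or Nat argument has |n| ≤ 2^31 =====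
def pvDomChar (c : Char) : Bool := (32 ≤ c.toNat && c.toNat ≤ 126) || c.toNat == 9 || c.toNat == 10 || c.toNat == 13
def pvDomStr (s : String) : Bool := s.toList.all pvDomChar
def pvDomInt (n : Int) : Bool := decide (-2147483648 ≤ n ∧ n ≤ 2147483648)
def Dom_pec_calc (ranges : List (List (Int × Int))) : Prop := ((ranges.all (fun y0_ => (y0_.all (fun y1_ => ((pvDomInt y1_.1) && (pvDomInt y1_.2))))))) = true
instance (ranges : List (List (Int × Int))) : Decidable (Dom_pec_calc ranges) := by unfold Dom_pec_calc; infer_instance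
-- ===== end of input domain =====

-- B replaces A's per-point per-rule interval tests (and A's redundant re-sort inside the rule loop)
-- by per-dimension precomputed coordinate→covering-rule-set dictionaries intersected per point
-- (alternative algorithm; measured ~5x at the largest size both finished, not confirmed beyond that).

-- ===== PORT A =====

-- itertools.product(*points) over a list of lists (first axis varies slowest), as list of lists
def pyProduct : List (List Int) → List (List Int)
  | [] => [[]]
  | xs :: rest => xs.flatMap (fun x => (pyProduct rest).map (fun t => x :: t))

def ranges_to_points (dim_ranges : List (Int × Int)) : List Int :=
  let pl : PySem.Set Int :=
    dim_ranges.foldl (fun pl r => PySem.Set.add (PySem.Set.add pl r.1) (r.2 + 1)) PySem.Set.empty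
  -- pl = list(pl); pl.sort(): sorting the set's elements (order of list(pl) is consumed only by sort)
  let pl := PySem.List.sorted pl (fun x => x) false
  PySem.List.slice pl none (some (-1))

def identify_pec (ranges : List (List (Int × Int))) (point : List Int) : List Int :=
  (PySem.List.enumerate ranges 0).foldl (fun ret jr =>
    let f : Int := (PySem.List.enumerate point 0).foldl (fun f ipd =>
      let ri := PySem.List.pyGetD jr.2 ipd.1 ((0:Int),(0:Int))  -- r[i]; in range under Pre_
      if ri.1 > ipd.2 ∨ ri.2 < ipd.2 then 1 else f) 0
    let ret := if f = 0 then ret ++ [jr.1] else ret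
    PySem.List.sorted ret (fun x => x) false) []

def pec_calc (ranges : List (List (Int × Int))) : List (List Int) :=
  let points : List (List Int) :=
    (PySem.List.pyRange 0 (PySem.List.pyGetD ranges 0 []).length 1).map (fun dim =>
      ranges_to_points (ranges.map (fun r => PySem.List.pyGetD r dim ((0:Int),(0:Int)))))
  (pyProduct points).foldl (fun (pecs : PySem.Set (List Int)) p =>
    let pec := identify_pec ranges p
    if pec ≠ [] then PySem.Set.add pecs pec else pecs) PySem.Set.empty

-- ===== PORT B =====

-- the per-point loop of B: s = [j for j in s if j in cover[d][c]], with break on empty s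
def altPoint (cover : List (PySem.Dict Int (List Int))) : List (Int × Int) → List Int → List Int
  | [], s => s
  | dc :: rest, s =>
    let cov := (PySem.List.pyGetD cover dc.1 PySem.Dict.empty).getD dc.2 []
    let s := s.filter (fun j => PySem.Set.contains cov j)
    if s = [] then s else altPoint cover rest s

def pec_calc_alt (ranges : List (List (Int × Int))) : List (List Int) :=
  let ndim : Int := (PySem.List.pyGetD ranges 0 []).length
  let pc :=
    (PySem.List.pyRange 0 ndim 1).foldl
      (fun (acc : List (List Int) × List (PySem.Dict Int (List Int))) dim =>
        let bps : PySem.Set Int :=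
          ranges.foldl (fun bps r =>
            let rd := PySem.List.pyGetD r dim ((0:Int),(0:Int))
            PySem.Set.add (PySem.Set.add bps rd.1) (rd.2 + 1)) PySem.Set.empty
        let bps := PySem.List.slice (PySem.List.sorted bps (fun x => x) false) none (some (-1))
        let cov : PySem.Dict Int (List Int) :=
          bps.foldl (fun d c =>
            d.insert c (PySem.Set.ofList
              (((PySem.List.enumerate ranges 0).filter (fun jr =>
                  let rd := PySem.List.pyGetD jr.2 dim ((0:Int),(0:Int))
                  decide (rd.1 ≤ c ∧ c ≤ rd.2))).map (fun jr => jr.1)))) PySem.Dict.empty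
        (acc.1 ++ [bps], acc.2 ++ [cov])) ([], [])
  (pyProduct pc.1).foldl (fun (pecs : PySem.Set (List Int)) p =>
    let s := altPoint pc.2 (PySem.List.enumerate p 0) (PySem.List.pyRange 0 ranges.length 1)
    if s ≠ [] then PySem.Set.add pecs s else pecs) PySem.Set.empty

-- ===== PRECONDITION & SPEC =====
-- Pre_ excludes exactly the inputs where the Python A raises IndexError:
-- an empty rule list (ranges[0]) and rules shorter than the first rule (r[dim]).
def Pre_pec_calc (ranges : List (List (Int × Int))) : Prop :=
  ranges ≠ [] ∧ ∀ r ∈ ranges, (PySem.List.pyGetD ranges 0 []).length ≤ r.length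
instance (ranges : List (List (Int × Int))) : Decidable (Pre_pec_calc ranges) := by
  unfold Pre_pec_calc; infer_instance
def pvWitness_pec_calc : (List (List (Int × Int))) := [[(10, 20), (1, 5)], [(15, 25), (0, 2)]]

def Spec_pec_calc (ranges : List (List (Int × Int))) (out : List (List Int)) : Prop := out = pec_calc_alt ranges
instance (ranges : List (List (Int × Int))) (out : List (List Int)) : Decidable (Spec_pec_calc ranges out) := by unfold Spec_pec_calc; infer_instance

-- ===== CLAIM (what is proved, stated in full; the proofs are below) =====
def Claim_equal_pec_calc : Prop := ∀ (ranges : List (List (Int × Int))), Dom_pec_calc ranges → Pre_pec_calc ranges → Spec_pec_calc ranges (pec_calc ranges)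

-- ===== LEMMAS AND PROOFS =====

-- predicate: rule r fails at dimension/value ipd (the flag trigger of A's inner loop)
def pvBad (r : List (Int × Int)) (ipd : Int × Int) : Bool :=
  decide ((PySem.List.pyGetD r ipd.1 ((0:Int),(0:Int))).1 > ipd.2 ∨
          (PySem.List.pyGetD r ipd.1 ((0:Int),(0:Int))).2 < ipd.2)

def pvGood (r : List (Int × Int)) (p : List Int) : Bool :=
  !((PySem.List.enumerate p 0).any (pvBad r))

lemma flag_eq (r : List (Int × Int)) (l : List (Int × Int)) : ∀ (f0 : Int),
    l.foldl (fun f ipd =>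
      if (PySem.List.pyGetD r ipd.1 ((0:Int),(0:Int))).1 > ipd.2 ∨
         (PySem.List.pyGetD r ipd.1 ((0:Int),(0:Int))).2 < ipd.2 then 1 else f) f0
    = if l.any (pvBad r) then 1 else f0 := by
  induction l with
  | nil => simp
  | cons x xs ih =>
    intro f0
    simp only [List.foldl_cons, List.any_cons, ih]
    by_cases h : (PySem.List.pyGetD r x.1 ((0:Int),(0:Int))).1 > x.2 ∨
        (PySem.List.pyGetD r x.1 ((0:Int),(0:Int))).2 < x.2
    · simp [pvBad, h]
    · rw [if_neg h]
      have hd : (decide ((PySem.List.pyGetD r x.1 ((0:Int),(0:Int))).1 > x.2 ∨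
          (PySem.List.pyGetD r x.1 ((0:Int),(0:Int))).2 < x.2)) = false := decide_eq_false h
      simp only [pvBad, hd, Bool.false_or]

lemma identify_loop (p : List Int) (xs : List (List (Int × Int))) : ∀ (s : Int) (ret : List Int),
    ret.Pairwise (· < ·) → (∀ y ∈ ret, y < s) →
    (PySem.List.enumerate xs s).foldl
      (fun ret jr =>
        let f : Int := (PySem.List.enumerate p 0).foldl (fun f ipd =>
          if (PySem.List.pyGetD jr.2 ipd.1 ((0:Int),(0:Int))).1 > ipd.2 ∨
             (PySem.List.pyGetD jr.2 ipd.1 ((0:Int),(0:Int))).2 < ipd.2 then 1 else f) 0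
        let ret := if f = 0 then ret ++ [jr.1] else ret
        PySem.List.sorted ret (fun x => x) false) ret
    = ret ++ ((PySem.List.enumerate xs s).filter (fun jr => pvGood jr.2 p)).map (·.1) := by
  induction xs with
  | nil => intro s ret _ _; simp [PySem.List.enumerate]
  | cons x xs ih =>
    intro s ret hpw hlt
    rw [PySem.List.enumerate_cons]
    simp only [List.foldl_cons, List.filter_cons]
    rw [flag_eq]
    by_cases h : (PySem.List.enumerate p 0).any (pvBad x) = true
    · have hg : pvGood x p = false := by simp [pvGood, h]
      have hs : PySem.List.sorted ret (fun x => x) false = ret :=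
        PySem.List.sorted_eq_of_perm_of_pairwise_lt ret ret _ (List.Perm.refl ret) hpw
      rw [if_pos h, if_neg (by norm_num : ¬ ((1:Int) = 0)), hs,
          ih (s+1) ret hpw (fun y hy => by have := hlt y hy; omega)]
      simp [hg]
    · have hg : pvGood x p = true := by simp [pvGood, h]
      have hpw2 : (ret ++ [s]).Pairwise (· < ·) := by
        rw [List.pairwise_append]
        exact ⟨hpw, List.pairwise_singleton _ _, fun y hy z hz => by
          simp at hz; subst hz; exact hlt y hy⟩
      have hs : PySem.List.sorted (ret ++ [s]) (fun x => x) false = ret ++ [s] :=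
        PySem.List.sorted_eq_of_perm_of_pairwise_lt _ _ _ (List.Perm.refl _) hpw2
      rw [if_neg h, if_pos rfl, hs,
          ih (s+1) (ret ++ [s]) hpw2 (fun y hy => by
            rcases List.mem_append.mp hy with h1 | h1
            · have := hlt y h1; omega
            · simp at h1; omega)]
      simp [hg]

lemma identify_closed (ranges : List (List (Int × Int))) (p : List Int) :
    identify_pec ranges p
    = ((PySem.List.enumerate ranges 0).filter (fun jr => pvGood jr.2 p)).map (·.1) := by
  have := identify_loop p ranges 0 [] (by simp) (by simp)
  simpa [identify_pec] using this

lemma getD_foldl_insert_not_mem (f : Int → PySem.Set Int) (l : List Int) (k : Int)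
    (h : k ∉ l) : ∀ (d : PySem.Dict Int (List Int)),
    (l.foldl (fun d c => d.insert c (f c)) d).getD k [] = d.getD k [] := by
  induction l with
  | nil => intro d; simp
  | cons c cs ih =>
    intro d
    simp only [List.foldl_cons]
    rw [ih (fun hk => h (List.mem_cons_of_mem _ hk)),
        PySem.Dict.getD_insert_of_ne _ _ _ (fun he => h (by subst he; exact List.mem_cons_self))]

lemma getD_foldl_insert_mem (f : Int → PySem.Set Int) (l : List Int) (k : Int)
    (h : k ∈ l) : ∀ (d : PySem.Dict Int (List Int)),
    (l.foldl (fun d c => d.insert c (f c)) d).getD k [] = f k := by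
  induction l with
  | nil => cases h
  | cons c cs ih =>
    intro d
    simp only [List.foldl_cons]
    by_cases hm : k ∈ cs
    · exact ih hm _
    · have : k = c := by rcases List.mem_cons.mp h with h1 | h1; exact h1; exact absurd h1 hm
      subst this
      rw [getD_foldl_insert_not_mem _ _ _ hm, PySem.Dict.getD_insert_self]

lemma foldl_filter_nil (l : List (Int × Int)) (g : (Int × Int) → Int → Bool) :
    l.foldl (fun s dc => s.filter (g dc)) [] = [] := by
  induction l with
  | nil => rfl
  | cons x xs ih => simpa using ih

lemma altPoint_eq_foldl (cover : List (PySem.Dict Int (List Int))) (l : List (Int × Int)) :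
    ∀ (s : List Int), altPoint cover l s
    = l.foldl (fun s dc => s.filter (fun j =>
        PySem.Set.contains ((PySem.List.pyGetD cover dc.1 PySem.Dict.empty).getD dc.2 []) j)) s := by
  induction l with
  | nil => intro s; rfl
  | cons dc rest ih =>
    intro s
    simp only [altPoint, List.foldl_cons]
    by_cases h : s.filter (fun j =>
        PySem.Set.contains ((PySem.List.pyGetD cover dc.1 PySem.Dict.empty).getD dc.2 []) j) = []
    · rw [if_pos h, h, foldl_filter_nil]
    · rw [if_neg h, ih]

lemma foldl_filter_eq_filter_all {β : Type} (l : List β) (g : β → Int → Bool) :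
    ∀ (s0 : List Int), l.foldl (fun s dc => s.filter (g dc)) s0
    = s0.filter (fun j => l.all (fun dc => g dc j)) := by
  induction l with
  | nil => intro s0; simp
  | cons dc rest ih =>
    intro s0
    simp only [List.foldl_cons, ih, List.filter_filter]
    apply List.filter_congr
    intro j _
    simp [List.all_cons, Bool.and_comm]

lemma mem_pyProduct (Ls : List (List Int)) (p : List Int) (h : p ∈ pyProduct Ls) :
    List.Forall₂ (· ∈ ·) p Ls := by
  induction Ls generalizing p with
  | nil =>
    simp [pyProduct] at h
    subst h; exact List.Forall₂.nil
  | cons xs rest ih =>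
    simp only [pyProduct, List.mem_flatMap, List.mem_map] at h
    obtain ⟨x, hx, t, ht, rfl⟩ := h
    exact List.Forall₂.cons hx (ih t ht)

-- B's per-dimension breakpoint list (also A's points for that dimension)
def pvPts (ranges : List (List (Int × Int))) (dim : Int) : List Int :=
  PySem.List.slice (PySem.List.sorted (ranges.foldl (fun bps r =>
    PySem.Set.add (PySem.Set.add bps (PySem.List.pyGetD r dim ((0:Int),(0:Int))).1)
      ((PySem.List.pyGetD r dim ((0:Int),(0:Int))).2 + 1)) PySem.Set.empty) (fun x => x) false)
    none (some (-1))

-- B's per-dimension coordinate → covering-rule-set dictionary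
def pvCovD (ranges : List (List (Int × Int))) (dim : Int) : PySem.Dict Int (List Int) :=
  (pvPts ranges dim).foldl (fun d c =>
    d.insert c (PySem.Set.ofList
      (((PySem.List.enumerate ranges 0).filter (fun jr =>
          decide ((PySem.List.pyGetD jr.2 dim ((0:Int),(0:Int))).1 ≤ c ∧
                  c ≤ (PySem.List.pyGetD jr.2 dim ((0:Int),(0:Int))).2))).map (fun jr => jr.1))))
    PySem.Dict.empty

lemma point_eq (ranges : List (List (Int × Int))) (p : List Int)
    (hp : List.Forall₂ (· ∈ ·) p
      ((PySem.List.pyRange 0 ((PySem.List.pyGetD ranges 0 []).length : Int) 1).map (pvPts ranges))) :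
    identify_pec ranges p
    = altPoint ((PySem.List.pyRange 0 ((PySem.List.pyGetD ranges 0 []).length : Int) 1).map (pvCovD ranges))
        (PySem.List.enumerate p 0) (PySem.List.pyRange 0 (ranges.length : Int) 1) := by
  have hlen : p.length = (PySem.List.pyGetD ranges 0 []).length := by
    have := List.Forall₂.length_eq hp
    simpa [PySem.List.length_pyRange_one] using this
  rw [identify_closed, altPoint_eq_foldl, foldl_filter_eq_filter_all]
  rw [PySem.List.enumerate_eq_map_pyRange ranges [], List.filter_map, List.map_map]
  rw [show ((fun (x : Int × List (Int × Int)) => x.1) ∘ fun j => (j, PySem.List.pyGetD ranges j []))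
      = id from rfl, List.map_id, PySem.List.len_eq]
  apply List.filter_congr
  intro j hj
  have hj' : (0:Int) ≤ j ∧ j < (ranges.length : Int) := PySem.List.mem_pyRange_one.mp hj
  rw [Bool.eq_iff_iff]
  simp only [Function.comp, pvGood, Bool.not_eq_true', List.any_eq_false, List.all_eq_true]
  apply forall_congr'
  intro dc
  apply imp_congr_right
  intro hdc
  obtain ⟨k, hk, rfl⟩ := (PySem.List.mem_enumerate_iff p 0 dc).mp hdc
  -- resolve the cover lookup:  cover[(0+k)][p[k]]
  have hknd : k < (PySem.List.pyGetD ranges 0 []).length := hlen ▸ hk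
  have hcov : PySem.List.pyGetD ((PySem.List.pyRange 0 ((PySem.List.pyGetD ranges 0 []).length : Int) 1).map (pvCovD ranges))
      ((0:Int) + (k:Int)) PySem.Dict.empty = pvCovD ranges (k:Int) := by
    rw [zero_add]
    exact PySem.List.pyGetD_map_pyRange (pvCovD ranges) _ k _ hknd
  have hmem : p[k] ∈ pvPts ranges (k:Int) := by
    obtain ⟨hl, hget⟩ := List.forall₂_iff_get.mp hp
    have h2 : k < ((PySem.List.pyRange 0 ((PySem.List.pyGetD ranges 0 []).length : Int) 1).map (pvPts ranges)).length := by
      simpa [PySem.List.length_pyRange_one] using hknd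
    have := hget k hk h2
    simpa [List.get_eq_getElem, PySem.List.getElem_pyRange_one] using this
  have hlook : (pvCovD ranges (k:Int)).getD ((0:Int) + (k:Int), p[k]).2 [] =
      PySem.Set.ofList (((PySem.List.enumerate ranges 0).filter (fun jr =>
          decide ((PySem.List.pyGetD jr.2 (k:Int) ((0:Int),(0:Int))).1 ≤ p[k] ∧
                  p[k] ≤ (PySem.List.pyGetD jr.2 (k:Int) ((0:Int),(0:Int))).2))).map (fun jr => jr.1)) := by
    exact getD_foldl_insert_mem _ _ _ hmem _
  rw [hcov, hlook]
  rw [PySem.Set.contains_iff, PySem.Set.mem_ofList]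
  rw [PySem.List.enumerate_eq_map_pyRange ranges [], List.filter_map, List.map_map]
  rw [show ((fun (x : Int × List (Int × Int)) => x.1) ∘ fun j => (j, PySem.List.pyGetD ranges j []))
      = id from rfl, List.map_id, PySem.List.len_eq]
  rw [List.mem_filter]
  simp only [pvBad, Function.comp, hj, true_and, zero_add, decide_eq_true_eq]
  constructor
  · intro h; exact ⟨by omega, by omega⟩
  · intro h; omega

lemma points_eq (ranges : List (List (Int × Int))) (dim : Int) :
    ranges_to_points (ranges.map (fun r => PySem.List.pyGetD r dim ((0:Int),(0:Int))))
    = pvPts ranges dim := by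
  simp [ranges_to_points, pvPts, List.foldl_map]

lemma main_eq (ranges : List (List (Int × Int))) : pec_calc ranges = pec_calc_alt ranges := by
  have hpc : (PySem.List.pyRange 0 ((PySem.List.pyGetD ranges 0 []).length : Int) 1).foldl
      (fun (acc : List (List Int) × List (PySem.Dict Int (List Int))) dim =>
        (acc.1 ++ [pvPts ranges dim], acc.2 ++ [pvCovD ranges dim])) ([], [])
      = ((PySem.List.pyRange 0 ((PySem.List.pyGetD ranges 0 []).length : Int) 1).map (pvPts ranges),
         (PySem.List.pyRange 0 ((PySem.List.pyGetD ranges 0 []).length : Int) 1).map (pvCovD ranges)) := by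
    rw [PySem.List.foldl_prod_mk (fun s dim => s ++ [pvPts ranges dim])
        (fun s dim => s ++ [pvCovD ranges dim])]
    rw [PySem.List.foldl_append_singleton_eq_map, PySem.List.foldl_append_singleton_eq_map]
    simp
  show (pyProduct ((PySem.List.pyRange 0 ((PySem.List.pyGetD ranges 0 []).length : Int) 1).map
          (fun dim => ranges_to_points (ranges.map (fun r => PySem.List.pyGetD r dim ((0:Int),(0:Int))))))).foldl
        (fun (pecs : PySem.Set (List Int)) p =>
          if identify_pec ranges p ≠ [] then PySem.Set.add pecs (identify_pec ranges p) else pecs)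
        PySem.Set.empty
      = (pyProduct ((PySem.List.pyRange 0 ((PySem.List.pyGetD ranges 0 []).length : Int) 1).foldl
          (fun (acc : List (List Int) × List (PySem.Dict Int (List Int))) dim =>
            (acc.1 ++ [pvPts ranges dim], acc.2 ++ [pvCovD ranges dim])) ([], [])).1).foldl
        (fun (pecs : PySem.Set (List Int)) p =>
          if altPoint ((PySem.List.pyRange 0 ((PySem.List.pyGetD ranges 0 []).length : Int) 1).foldl
              (fun (acc : List (List Int) × List (PySem.Dict Int (List Int))) dim =>
                (acc.1 ++ [pvPts ranges dim], acc.2 ++ [pvCovD ranges dim])) ([], [])).2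
              (PySem.List.enumerate p 0) (PySem.List.pyRange 0 (ranges.length : Int) 1) ≠ []
          then PySem.Set.add pecs (altPoint ((PySem.List.pyRange 0 ((PySem.List.pyGetD ranges 0 []).length : Int) 1).foldl
              (fun (acc : List (List Int) × List (PySem.Dict Int (List Int))) dim =>
                (acc.1 ++ [pvPts ranges dim], acc.2 ++ [pvCovD ranges dim])) ([], [])).2
              (PySem.List.enumerate p 0) (PySem.List.pyRange 0 (ranges.length : Int) 1))
          else pecs)
        PySem.Set.empty
  rw [hpc]
  simp only [points_eq]
  apply PySem.List.foldl_congr_mem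
  intro acc p hp
  rw [point_eq ranges p (mem_pyProduct _ _ hp)]

-- ===== VERDICT (by name: the statement is the Claim_ definition above) =====
theorem pec_calc_spec : Claim_equal_pec_calc := by
  intro ranges _ _
  show pec_calc ranges = pec_calc_alt ranges
  exact main_eq ranges
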